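-- pv_equiv track=rewrite | github.com/schmibbs/Projects | EForT class diagram/classDiagramScript.py | isMethod
-- ===== SOURCE A (Python) =====
-- def isMethod(line):
--     tempIndex = 0
--     while (tempIndex < len(line) and line[tempIndex] != ";"):
--         if (line[tempIndex] == "("):    # or line[tempIndex] == "{"):
--             checkIndex = tempIndex      #used to check for if statements since they also use ()
--             while (checkIndex >= 0):
--                 if (line[checkIndex : checkIndex+4] == "if (" or line[checkIndex:checkIndex+5]=="for (" or
--                    (line[checkIndex : checkIndex+3] == "if(" or line[checkIndex:checkIndex+4]=="for(" or
--                     line[checkIndex:checkIndex+7]=="return(" or line[checkIndex:checkIndex+7]=="return " or line[checkIndex]=="[")):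
--                     return False
--                 checkIndex -= 1
--             return True                 #src: https://www.geeksforgeeks.org/bool-in-python/
--         tempIndex += 1
--     return False
-- ===== SOURCE B (Python) =====
-- def isMethod(line):
--     op = line.find('(')
--     if op == -1:
--         return False
--     semi = line.find(';')
--     if semi != -1 and semi < op:
--         return False
--     if '[' in line[:op + 1]:
--         return False
--     for kw in ('if (', 'for (', 'if(', 'for(', 'return(', 'return '):
--         idx = line.find(kw)
--         if 0 <= idx <= op:
--             return False
--     return True
-- ===== Notes on version B (the rewrite author's own statement) =====
-- stated objective: faster
-- what changed: A scans characters one by one and rescans backwards from the first opening parenthesis; B instead asks the string directly for the first occurrence of the parenthesis, the semicolon and each disqualifying keyword and compares those positions, plus one membership test on the prefix.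
import Mathlib
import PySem

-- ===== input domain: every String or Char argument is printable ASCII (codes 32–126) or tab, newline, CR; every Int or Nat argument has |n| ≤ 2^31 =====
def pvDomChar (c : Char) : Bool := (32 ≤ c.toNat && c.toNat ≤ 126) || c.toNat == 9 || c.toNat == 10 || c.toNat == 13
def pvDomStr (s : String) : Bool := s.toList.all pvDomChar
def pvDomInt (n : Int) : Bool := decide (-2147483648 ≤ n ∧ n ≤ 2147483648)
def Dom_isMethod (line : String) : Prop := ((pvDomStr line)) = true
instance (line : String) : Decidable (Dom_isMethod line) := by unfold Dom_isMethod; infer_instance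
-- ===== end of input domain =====

-- ===== PORT A =====
-- B replaces A's two hand-written character-scan loops by first-occurrence str.find/membership tests (objective: faster, measured; same return value).
def pvMatchAt (s : List Char) (k : Nat) : Bool :=
  PySem.List.slice s (some (k:Int)) (some ((k:Int)+4)) == "if (".toList ||
  PySem.List.slice s (some (k:Int)) (some ((k:Int)+5)) == "for (".toList ||
  PySem.List.slice s (some (k:Int)) (some ((k:Int)+3)) == "if(".toList ||
  PySem.List.slice s (some (k:Int)) (some ((k:Int)+4)) == "for(".toList ||
  PySem.List.slice s (some (k:Int)) (some ((k:Int)+7)) == "return(".toList ||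
  PySem.List.slice s (some (k:Int)) (some ((k:Int)+7)) == "return ".toList ||
  PySem.List.pyGet? s (k:Int) == some '['

-- A's inner 'while (checkIndex >= 0)' loop, counting checkIndex down to 0
def pvCheckA (s : List Char) : Nat → Bool
  | 0 => if pvMatchAt s 0 then false else true
  | k+1 => if pvMatchAt s (k+1) then false else pvCheckA s k

-- A's outer 'while (tempIndex < len(line) and line[tempIndex] != ";")' loop
def pvLoopA (s : List Char) (i : Nat) : Bool :=
  if h : i < s.length then
    if s[i] == ';' then false
    else if s[i] == '(' then pvCheckA s i
    else pvLoopA s (i+1)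
  else false
termination_by s.length - i

def isMethod (line : String) : Bool := pvLoopA line.toList 0

-- ===== PORT B =====
def pvKws : List (List Char) :=
  ["if (".toList, "for (".toList, "if(".toList, "for(".toList, "return(".toList, "return ".toList]

def isMethod_alt (line : String) : Bool :=
  let s := line.toList
  let op := PySem.Chars.find s ['(']
  if op == -1 then false
  else
    let semi := PySem.Chars.find s [';']
    if semi != -1 && decide (semi < op) then false
    else if PySem.Chars.isIn ['['] (PySem.List.slice s none (some (op+1))) then false
    else pvKws.all fun kw =>
      let idx := PySem.Chars.find s kw
      !(decide (0 ≤ idx) && decide (idx ≤ op))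

-- ===== PRECONDITION & SPEC =====
def Spec_isMethod (line : String) (out : Bool) : Prop := out = isMethod_alt line
instance (line : String) (out : Bool) : Decidable (Spec_isMethod line out) := by unfold Spec_isMethod; infer_instance

-- ===== CLAIM (what is proved, stated in full; the proofs are below) =====
def Claim_equal_isMethod : Prop := ∀ (line : String), Dom_isMethod line → Spec_isMethod line (isMethod line)

-- ===== LEMMAS AND PROOFS =====

theorem pv_singleton_prefix_iff (c : Char) (l : List Char) : [c] <+: l ↔ l.head? = some c := by
  cases l with
  | nil => simp
  | cons a t => simp [List.cons_prefix_iff]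

theorem pv_singleton_prefix_drop (c : Char) (s : List Char) (k : Nat) :
    [c] <+: s.drop k ↔ s[k]? = some c := by
  rw [pv_singleton_prefix_iff, List.head?_drop]

-- A's backward scan succeeds iff no pattern matches at any index ≤ p
theorem pvCheckA_iff (s : List Char) (p : Nat) :
    pvCheckA s p = true ↔ ∀ k, k ≤ p → pvMatchAt s k = false := by
  induction p with
  | zero =>
    rw [pvCheckA]
    constructor
    · intro h k hk
      interval_cases k
      by_contra hm
      rw [Bool.not_eq_false] at hm
      rw [if_pos hm] at h
      exact Bool.false_ne_true h
    · intro h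
      rw [if_neg (by rw [h 0 le_rfl]; exact Bool.false_ne_true)]
  | succ n ih =>
    rw [pvCheckA]
    by_cases hm : pvMatchAt s (n+1) = true
    · rw [if_pos hm]
      constructor
      · intro h; exact absurd h Bool.false_ne_true
      · intro h; exact absurd (h (n+1) le_rfl) (by simp [hm])
    · rw [if_neg hm, ih]
      simp only [Bool.not_eq_true] at hm
      constructor
      · intro h k hk
        rcases Nat.lt_or_ge k (n+1) with h' | h'
        · exact h k (by omega)
        · have : k = n + 1 := by omega
          rw [this]; exact hm
      · intro h k hk; exact h k (Nat.le_succ_of_le hk)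

-- a pattern matches at k iff a keyword occurs at k or s[k] = '['
theorem pvMatchAt_iff (s : List Char) (k : Nat) :
    pvMatchAt s k = true ↔ (∃ kw ∈ pvKws, kw <+: s.drop k) ∨ s[k]? = some '[' := by
  have hsl : ∀ (L : Nat) (t : List Char), t.length = L →
      (((PySem.List.slice s (some (k:Int)) (some ((k:Int)+L)) == t) = true) ↔ t <+: s.drop k) := by
    intro L t ht
    rw [beq_iff_eq, PySem.List.slice_natCast_add s k L]
    constructor
    · intro h; exact h ▸ List.take_prefix L (s.drop k)
    · intro h
      have := List.prefix_iff_eq_take.mp h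
      rw [this, ht]
  simp only [pvMatchAt, Bool.or_eq_true, pvKws]
  have e1 := hsl 4 "if (".toList (by decide)
  have e2 := hsl 5 "for (".toList (by decide)
  have e3 := hsl 3 "if(".toList (by decide)
  have e4 := hsl 4 "for(".toList (by decide)
  have e5 := hsl 7 "return(".toList (by decide)
  have e6 := hsl 7 "return ".toList (by decide)
  simp only [Nat.cast_ofNat] at e1 e2 e3 e4 e5 e6
  rw [e1, e2, e3, e4, e5, e6]
  have hget : (PySem.List.pyGet? s (k:Int) == some '[') = true ↔ s[k]? = some '[' := by
    rw [PySem.List.pyGet?_natCast]; exact beq_iff_eq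
  rw [hget]
  constructor
  · rintro ((((((h|h)|h)|h)|h)|h)|h)
    · exact Or.inl ⟨_, by simp, h⟩
    · exact Or.inl ⟨_, by simp, h⟩
    · exact Or.inl ⟨_, by simp, h⟩
    · exact Or.inl ⟨_, by simp, h⟩
    · exact Or.inl ⟨_, by simp, h⟩
    · exact Or.inl ⟨_, by simp, h⟩
    · exact Or.inr h
  · rintro (⟨kw, hkw, hpre⟩|h)
    · simp only [List.mem_cons, List.not_mem_nil, or_false] at hkw
      rcases hkw with h|h|h|h|h|h <;> subst h
      · exact Or.inl (Or.inl (Or.inl (Or.inl (Or.inl (Or.inl hpre)))))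
      · exact Or.inl (Or.inl (Or.inl (Or.inl (Or.inl (Or.inr hpre)))))
      · exact Or.inl (Or.inl (Or.inl (Or.inl (Or.inr hpre))))
      · exact Or.inl (Or.inl (Or.inl (Or.inr hpre)))
      · exact Or.inl (Or.inl (Or.inr hpre))
      · exact Or.inl (Or.inr hpre)
    · exact Or.inr h

-- first occurrence ≤ p iff some occurrence ≤ p
theorem pv_find_le_iff (s t : List Char) (p : Nat) :
    (0 ≤ PySem.Chars.find s t ∧ PySem.Chars.find s t ≤ (p:Int)) ↔ ∃ k, k ≤ p ∧ t <+: s.drop k := by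
  constructor
  · rintro ⟨h0, hle⟩
    obtain ⟨hpre, -⟩ := PySem.Chars.find_spec h0
    exact ⟨(PySem.Chars.find s t).toNat, by omega, hpre⟩
  · rintro ⟨k, hk, hpre⟩
    have hin : PySem.Chars.isIn t s = true :=
      (PySem.Chars.exists_prefix_drop_iff_isIn t s).mp ⟨k, hpre⟩
    have hinf := (PySem.Chars.isIn_iff_infix t s).mp hin
    have h0 : 0 ≤ PySem.Chars.find s t := (PySem.Chars.find_nonneg_iff s t).mpr hinf
    refine ⟨h0, ?_⟩
    obtain ⟨-, hmin⟩ := PySem.Chars.find_spec h0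
    have : (PySem.Chars.find s t).toNat ≤ k := by
      by_contra h
      exact hmin k (by omega) hpre
    omega

-- A's loop, when indices i..p-1 hold neither '(' nor ';' and s[p] = '(', lands on the check at p
theorem pvLoopA_reach (s : List Char) (i p : Nat) (hip : i ≤ p) (hp : s[p]? = some '(')
    (hmid : ∀ j, i ≤ j → j < p → s[j]? ≠ some '(' ∧ s[j]? ≠ some ';') :
    pvLoopA s i = pvCheckA s p := by
  have hplen : p < s.length := by
    by_contra h
    rw [List.getElem?_eq_none (by omega)] at hp
    simp at hp
  induction hn : p - i generalizing i with
  | zero =>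
    have hie : i = p := by omega
    rw [List.getElem?_eq_getElem hplen] at hp
    have hpc : s[p] = '(' := Option.some.inj hp
    rw [pvLoopA, hie, dif_pos hplen, hpc]
    simp
  | succ n ih =>
    have hilen : i < s.length := by omega
    obtain ⟨h1, h2⟩ := hmid i (le_refl i) (by omega)
    rw [List.getElem?_eq_getElem hilen] at h1 h2
    rw [pvLoopA, dif_pos hilen]
    have hb1 : (s[i] == ';') = false := by
      simp only [beq_eq_false_iff_ne, ne_eq]; intro h; exact h2 (by rw [h])
    have hb2 : (s[i] == '(') = false := by
      simp only [beq_eq_false_iff_ne, ne_eq]; intro h; exact h1 (by rw [h])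
    rw [hb1, hb2]
    simp only [Bool.false_eq_true, if_false]
    exact ih (i+1) (by omega) (fun j hj hjp => hmid j (by omega) hjp) (by omega)

-- A's loop returns false when every '(' at or after i has a ';' strictly before it (at or after i)
theorem pvLoopA_false (s : List Char) (i : Nat)
    (h : ∀ p, i ≤ p → s[p]? = some '(' → ∃ j, i ≤ j ∧ j < p ∧ s[j]? = some ';') :
    pvLoopA s i = false := by
  induction hn : s.length - i generalizing i with
  | zero =>
    rw [pvLoopA, dif_neg (by omega)]
  | succ n ih =>
    have hilen : i < s.length := by omega
    rw [pvLoopA, dif_pos hilen]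
    by_cases hsemi : s[i] = ';'
    · simp [hsemi]
    · have hpar : s[i] ≠ '(' := by
        intro hc
        obtain ⟨j, hj1, hj2, -⟩ := h i (le_refl i) (by rw [List.getElem?_eq_getElem hilen, hc])
        omega
      have hb1 : (s[i] == ';') = false := by simp [hsemi]
      have hb2 : (s[i] == '(') = false := by simp [hpar]
      rw [hb1, hb2]
      simp only [Bool.false_eq_true, if_false]
      refine ih (i+1) ?_ (by omega)
      intro p hp hpc
      obtain ⟨j, hj1, hj2, hj3⟩ := h p (by omega) hpc
      refine ⟨j, ?_, hj2, hj3⟩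
      rcases Nat.eq_or_lt_of_le hj1 with h' | h'
      · exfalso
        rw [← h', List.getElem?_eq_getElem hilen] at hj3
        exact hsemi (Option.some.inj hj3)
      · omega

theorem isMethod_eq_alt (line : String) : isMethod line = isMethod_alt line := by
  set s := line.toList with hs
  simp only [isMethod, isMethod_alt, ← hs]
  set f := PySem.Chars.find s ['('] with hf
  by_cases hfn : f = -1
  -- no '(' anywhere: both false
  · have hnop : ∀ p : Nat, s[p]? ≠ some '(' := by
      intro p hc
      have : ['('] <:+: s := (List.singleton_infix_iff _ _).mpr (List.mem_iff_getElem?.mpr ⟨p, hc⟩)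
      exact absurd hfn (by rw [hf]; exact (PySem.Chars.find_ne_neg_one_iff s ['(']).mpr this)
    rw [if_pos (by simp [hfn])]
    exact pvLoopA_false s 0 (fun p _ hpc => absurd hpc (hnop p))
  · rw [if_neg (by simp [hfn])]
    have h0 : 0 ≤ f := by
      have := PySem.Chars.neg_one_le_find (s := s) (sub := ['('])
      rw [← hf] at this; omega
    set p := f.toNat with hp
    obtain ⟨hpre, hmin⟩ := PySem.Chars.find_spec (hf ▸ h0)
    rw [← hf, ← hp] at hpre hmin
    have hppar : s[p]? = some '(' := (pv_singleton_prefix_drop _ _ _).mp hpre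
    have hnopar : ∀ j, j < p → s[j]? ≠ some '(' := by
      intro j hj hc
      exact hmin j hj ((pv_singleton_prefix_drop _ _ _).mpr hc)
    set g := PySem.Chars.find s [';'] with hg
    by_cases hsem : g ≠ -1 ∧ g < f
    -- first ';' strictly before first '(': both false
    · rw [if_pos (by simp [hsem.1, hsem.2])]
      have hg0 : 0 ≤ g := by
        have := PySem.Chars.neg_one_le_find (s := s) (sub := [';'])
        rw [← hg] at this
        omega
      obtain ⟨hgpre, -⟩ := PySem.Chars.find_spec (hg ▸ hg0)
      rw [← hg] at hgpre
      have hqsemi : s[g.toNat]? = some ';' := (pv_singleton_prefix_drop _ _ _).mp hgpre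
      refine pvLoopA_false s 0 ?_
      intro q _ hqc
      have hqp : p ≤ q := by
        by_contra h
        exact hnopar q (by omega) hqc
      exact ⟨g.toNat, by omega, by omega, hqsemi⟩
    -- no ';' before the first '(': A runs the backward check at p, B its find tests
    · rw [if_neg (by simp only [bne, Bool.and_eq_true, Bool.not_eq_true', decide_eq_true_eq,
        beq_eq_false_iff_ne, ne_eq]; exact fun h => hsem ⟨h.1, h.2⟩)]
      have hnosemi : ∀ j, j < p → s[j]? ≠ some ';' := by
        intro j hj hc
        have : ∃ k, k ≤ j ∧ [';'] <+: s.drop k := ⟨j, le_refl j, (pv_singleton_prefix_drop _ _ _).mpr hc⟩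
        obtain ⟨hg0, hgle⟩ := (pv_find_le_iff s [';'] j).mpr this
        rw [← hg] at hg0 hgle
        exact hsem ⟨by omega, by omega⟩
      have hA : pvLoopA s 0 = pvCheckA s p :=
        pvLoopA_reach s 0 p (Nat.zero_le p) hppar
          (fun j _ hj => ⟨hnopar j hj, hnosemi j hj⟩)
      rw [hA]
      -- '[' test
      by_cases hbr : ∃ k, k ≤ p ∧ s[k]? = some '['
      · rw [if_pos ?hpos]
        case hpos =>
          obtain ⟨k, hk, hkc⟩ := hbr
          have hf1 : f + 1 = ((p+1 : Nat) : Int) := by omega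
          rw [hf1, PySem.List.slice_to_natCast s (p+1)]
          rw [PySem.Chars.isIn_iff_infix]
          refine (List.singleton_infix_iff _ _).mpr ?_
          refine List.mem_iff_getElem?.mpr ⟨k, ?_⟩
          rw [List.getElem?_take, if_pos (by omega)]
          exact hkc
        rw [← Bool.not_eq_true, pvCheckA_iff]
        intro hall
        obtain ⟨k, hk, hkc⟩ := hbr
        have := hall k hk
        rw [← Bool.not_eq_true, pvMatchAt_iff] at this
        exact this (Or.inr hkc)
      · rw [if_neg ?hneg]
        case hneg =>
          intro hc
          have hf1 : f + 1 = ((p+1 : Nat) : Int) := by omega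
          rw [hf1, PySem.List.slice_to_natCast s (p+1), PySem.Chars.isIn_iff_infix] at hc
          have := (List.singleton_infix_iff _ _).mp hc
          obtain ⟨k, hkc⟩ := List.mem_iff_getElem?.mpr (List.mem_iff_getElem?.mp this) |> List.mem_iff_getElem?.mp
          rw [List.getElem?_take] at hkc
          by_cases hkp : k < p + 1
          · rw [if_pos hkp] at hkc
            exact hbr ⟨k, by omega, hkc⟩
          · rw [if_neg hkp] at hkc
            simp at hkc
        -- remaining: checkA p = all-keywords test
        rw [Bool.eq_iff_iff, pvCheckA_iff, List.all_eq_true]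
        constructor
        · intro h kw hkw
          by_contra hc
          rw [Bool.not_eq_true, Bool.not_eq_eq_eq_not, Bool.not_false, Bool.and_eq_true,
            decide_eq_true_eq, decide_eq_true_eq] at hc
          obtain ⟨k, hk, hkpre⟩ := (pv_find_le_iff s kw p).mp ⟨hc.1, by rw [hp]; omega⟩
          have := h k hk
          rw [← Bool.not_eq_true, pvMatchAt_iff] at this
          exact this (Or.inl ⟨kw, hkw, hkpre⟩)
        · intro h k hk
          rw [← Bool.not_eq_true, pvMatchAt_iff]
          rintro (⟨kw, hkw, hkpre⟩ | hbrk)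
          · have := h kw hkw
            simp only [Bool.not_eq_eq_eq_not, Bool.not_true, Bool.and_eq_false_iff,
              decide_eq_false_iff_not, not_le] at this
            obtain ⟨h0', hle'⟩ := (pv_find_le_iff s kw p).mpr ⟨k, hk, hkpre⟩
            rcases this with h' | h'
            · exact absurd h0' (not_le.mpr h')
            · rw [hp] at hle'; omega
          · exact hbr ⟨k, hk, hbrk⟩

-- ===== VERDICT (by name: the statement is the Claim_ definition above) =====
theorem isMethod_spec : Claim_equal_isMethod := by
  intro line _
  unfold Spec_isMethod
  exact isMethod_eq_alt line
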